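-- pv_equiv track=rewrite | github.com/WLAN-Pi/wlanpi-profiler | profiler/helpers.py | flag_last_object
-- ===== SOURCE A (Python) =====
-- def flag_last_object(seq):
--     """Treat the last object in an iterable differently.
--
--     Yields (item, is_last) tuples where is_last is True for the final item.
--     Handles empty sequences gracefully by yielding nothing.
--     """
--     seq = iter(seq)  # ensure seq is an iterator
--     try:
--         _a = next(seq)
--     except StopIteration:
--         return  # Empty sequence - nothing to yield
--     for _b in seq:
--         yield _a, False
--         _a = _b
--     yield _a, True
-- ===== SOURCE B (Python) =====
-- def flag_last_object(seq):
--     """Treat the last object in an iterable differently.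
--
--     Yields (item, is_last) tuples where is_last is True for the final item.
--     Handles empty sequences gracefully by yielding nothing.
--     """
--     items = list(seq)
--     n = len(items)
--     for i, x in enumerate(items):
--         yield x, i == n - 1
-- ===== Notes on version B (the rewrite author's own statement) =====
-- stated objective: simpler
-- what changed: B materialises the sequence into a list and flags the last item by comparing each enumerate index with len-1, instead of A's one-ahead lookahead buffer; B is eager while A streams lazily (return values identical on finite input).
import Mathlib
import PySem

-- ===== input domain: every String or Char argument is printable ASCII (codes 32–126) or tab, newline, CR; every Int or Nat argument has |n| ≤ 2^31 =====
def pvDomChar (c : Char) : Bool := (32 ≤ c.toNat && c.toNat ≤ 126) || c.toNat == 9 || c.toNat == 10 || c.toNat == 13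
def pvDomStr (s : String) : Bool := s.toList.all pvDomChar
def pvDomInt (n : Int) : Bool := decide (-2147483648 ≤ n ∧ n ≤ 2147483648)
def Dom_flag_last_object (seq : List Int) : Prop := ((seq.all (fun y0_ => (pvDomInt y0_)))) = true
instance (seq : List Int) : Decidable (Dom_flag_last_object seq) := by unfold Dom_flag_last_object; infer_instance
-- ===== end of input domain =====

-- B flags the last item by index == len-1 over an eagerly built list, instead of A's lookahead buffer; return values identical on finite input (B is eager, A lazy).

-- ===== PORT A =====
-- A's generator loop: keep previous item _a, yield (_a, False) for each further item, then (_a, True).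
def flagA_loop (a : Int) : List Int → List (Int × Bool)
  | [] => [(a, true)]
  | b :: rest => (a, false) :: flagA_loop b rest

def flag_last_object (seq : List Int) : List (Int × Bool) :=
  match seq with
  | [] => []                       -- StopIteration on first next: yield nothing
  | a :: rest => flagA_loop a rest

-- ===== PORT B =====
def flag_last_object_alt (seq : List Int) : List (Int × Bool) :=
  (PySem.List.enumerate seq).map (fun p => (p.2, decide (p.1 = (seq.length : Int) - 1)))

-- ===== PRECONDITION & SPEC =====
def Spec_flag_last_object (seq : List Int) (out : List (Int × Bool)) : Prop := out = flag_last_object_alt seq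
instance (seq : List Int) (out : List (Int × Bool)) : Decidable (Spec_flag_last_object seq out) := by unfold Spec_flag_last_object; infer_instance

-- ===== CLAIM (what is proved, stated in full; the proofs are below) =====
def Claim_equal_flag_last_object : Prop := ∀ (seq : List Int), Dom_flag_last_object seq → Spec_flag_last_object seq (flag_last_object seq)

-- ===== LEMMAS AND PROOFS =====
theorem flagA_loop_eq (l : List Int) : ∀ (a : Int) (s : Int),
    flagA_loop a l = (PySem.List.enumerate (a :: l) s).map (fun p => (p.2, decide (p.1 = s + l.length))) := by
  induction l with
  | nil => intro a s; simp [flagA_loop, PySem.List.enumerate_cons]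
  | cons b rest ih =>
    intro a s
    have hf : (fun p : Int × Int => (p.2, decide (p.1 = s + 1 + (rest.length : Int)))) =
        (fun p : Int × Int => (p.2, decide (p.1 = s + ((b :: rest).length : Int)))) := by
      funext p
      simp only [Prod.mk.injEq, true_and, decide_eq_decide, List.length_cons]
      push_cast
      omega
    simp only [flagA_loop, PySem.List.enumerate_cons, List.map_cons, ih b (s + 1), hf,
      List.cons.injEq, Prod.mk.injEq, true_and, and_true]
    simp only [List.length_cons, eq_comm (a := false), decide_eq_false_iff_not]
    push_cast
    omega

-- ===== VERDICT (by name: the statement is the Claim_ definition above) =====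
theorem flag_last_object_spec : Claim_equal_flag_last_object := by
  intro seq _
  unfold Spec_flag_last_object
  cases seq with
  | nil => simp [flag_last_object, flag_last_object_alt, PySem.List.enumerate]
  | cons a rest =>
    show flagA_loop a rest = flag_last_object_alt (a :: rest)
    unfold flag_last_object_alt
    rw [flagA_loop_eq rest a 0]
    congr 1
    funext p
    simp only [List.length_cons, Prod.mk.injEq, true_and, decide_eq_decide]
    push_cast
    omega
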